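-- pv_equiv track=rewrite | github.com/Coding-Crew-Forever/Coding-Test-Study | chaeryeon823/PGS_86052.py | solution
-- ===== SOURCE A (Python) =====
-- def solution(grid):
--     row = len(grid)
--     col = len(grid[0])
--
--     visits = [[[False for _ in range(4)] for _ in range(col)] for _ in range(row)]
--
--     directions = [(-1, 0), (0, 1), (1, 0), (0, -1)]
--
--     def dfs(r, c, d):
--         path_length = 0
--         while not visits[r][c][d]:
--             visits[r][c][d] = True
--             path_length += 1
--
--             if grid[r][c] == 'L':
--                 d = (d - 1) % 4
--             elif grid[r][c] == 'R':
--                 d = (d + 1) % 4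
--
--             r = (r + directions[d][0]) % row
--             c = (c + directions[d][1]) % col
--
--         return path_length
--
--     answer = []
--     for r in range(row):
--         for c in range(col):
--             for d in range(4):
--                 if not visits[r][c][d]:
--                     cycle_length = dfs(r, c, d)
--                     if cycle_length > 0:
--                         answer.append(cycle_length)
--
--     return sorted(answer)
-- ===== SOURCE B (Python) =====
-- def solution(grid):
--     row = len(grid)
--     col = len(grid[0])
--     directions = ((-1, 0), (0, 1), (1, 0), (0, -1))
--
--     def step(r, c, d):
--         ch = grid[r][c]
--         if ch == 'L':
--             d = (d - 1) % 4
--         elif ch == 'R':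
--             d = (d + 1) % 4
--         return (r + directions[d][0]) % row, (c + directions[d][1]) % col, d
--
--     # The beam transition is a bijection on (row, col, direction) states, so the state
--     # space splits into pure cycles.  Count each cycle exactly once, at its
--     # lexicographically smallest state, with no visited bookkeeping at all.
--     answer = []
--     for r in range(row):
--         for c in range(col):
--             for d in range(4):
--                 length = 1
--                 state = step(r, c, d)
--                 while state != (r, c, d):
--                     if state < (r, c, d):
--                         break            # a smaller member exists: not this cycle's representative
--                     length += 1
--                     state = step(*state)
--                 else:
--                     answer.append(length)
--     return sorted(answer)
-- ===== Notes on version B (the rewrite author's own statement) =====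
-- stated objective: alternative
-- what changed: B drops A's 3D visited array and dfs-marking entirely: since the beam transition is a bijection, the state space is a disjoint union of cycles, and B walks each cycle memorylessly, recording its length only when started at the cycle's lexicographically smallest state (with an early break once a smaller member is seen).
import Mathlib
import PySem

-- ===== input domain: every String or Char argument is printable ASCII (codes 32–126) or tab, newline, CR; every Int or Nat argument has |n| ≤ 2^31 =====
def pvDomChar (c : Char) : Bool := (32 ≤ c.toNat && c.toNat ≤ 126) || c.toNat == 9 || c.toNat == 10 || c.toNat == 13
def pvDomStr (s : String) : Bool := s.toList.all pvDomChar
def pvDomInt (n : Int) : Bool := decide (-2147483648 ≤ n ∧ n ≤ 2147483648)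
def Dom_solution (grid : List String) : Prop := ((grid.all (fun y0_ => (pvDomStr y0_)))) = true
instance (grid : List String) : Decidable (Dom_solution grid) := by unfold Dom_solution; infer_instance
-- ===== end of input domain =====

-- B drops A's 3D visited array and dfs marking: the beam transition is a bijection, so B walks each
-- cycle memorylessly and records its length only at the cycle's lexicographically smallest state
-- (alternative algorithm, same result; no speed claim).

-- ===== PORT A =====
-- directions = [(-1,0),(0,1),(1,0),(0,-1)]
def pvDirs : List (Int × Int) := [(-1, 0), (0, 1), (1, 0), (0, -1)]

-- grid[r][c]; exact under Pre_: every access has 0 ≤ r < len(grid), 0 ≤ c < len(grid[r])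
def pvChar (grid : List String) (r c : Int) : Char :=
  ((grid.getD r.toNat "").toList).getD c.toNat ' '

-- visits[r][c][d]; indices produced by % are in range under Pre_, so getD defaults never fire
def pvGet3 (v : List (List (List Bool))) (r c d : Int) : Bool :=
  ((v.getD r.toNat []).getD c.toNat []).getD d.toNat false

-- visits[r][c][d] = True
def pvSet3 (v : List (List (List Bool))) (r c d : Int) : List (List (List Bool)) :=
  v.set r.toNat ((v.getD r.toNat []).set c.toNat
    (((v.getD r.toNat []).getD c.toNat []).set d.toNat true))

-- the loop body's turn (L/R) and wrapped move; Python's % is PySem.Int.mod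
def pvStepA (grid : List String) (row col r c d : Int) : Int × Int × Int :=
  let d' := if pvChar grid r c = 'L' then PySem.Int.mod (d - 1) 4
            else if pvChar grid r c = 'R' then PySem.Int.mod (d + 1) 4
            else d
  let dir := pvDirs.getD d'.toNat (0, 0)
  (PySem.Int.mod (r + dir.1) row, PySem.Int.mod (c + dir.2) col, d')

-- the while-loop of dfs; fuel (row*col*4)+1 bounds it: each iteration marks a fresh state
def pvDfsA (grid : List String) (row col : Int) :
    Nat → List (List (List Bool)) → Int → Int → Int → Int → Int × List (List (List Bool))
  | 0, v, _, _, _, len => (len, v)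
  | f + 1, v, r, c, d, len =>
    if pvGet3 v r c d then (len, v)
    else
      pvDfsA grid row col f (pvSet3 v r c d) (pvStepA grid row col r c d).1
        (pvStepA grid row col r c d).2.1 (pvStepA grid row col r c d).2.2 (len + 1)

-- body of the innermost 'for d' loop: call dfs on unvisited states, append positive lengths
def pvBodyA (grid : List String) (row col : Int) (fuel : Nat)
    (acc : List Int × List (List (List Bool))) (r c d : Int) :
    List Int × List (List (List Bool)) :=
  if pvGet3 acc.2 r c d then acc
  else
    let p := pvDfsA grid row col fuel acc.2 r c d 0
    (if 0 < p.1 then acc.1 ++ [p.1] else acc.1, p.2)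

def solution (grid : List String) : List Int :=
  let row : Int := grid.length
  let col : Int := (grid.getD 0 "").toList.length   -- len(grid[0]); Pre_ excludes grid = []
  let fuel := (row * col * 4).toNat + 1
  let init : List Int × List (List (List Bool)) :=
    ([], List.replicate row.toNat (List.replicate col.toNat (List.replicate 4 false)))
  let res :=
    (PySem.List.pyRange 0 row 1).foldl (fun acc r =>
      (PySem.List.pyRange 0 col 1).foldl (fun acc c =>
        (PySem.List.pyRange 0 4 1).foldl (fun acc d =>
          pvBodyA grid row col fuel acc r c d) acc) acc) init
  PySem.List.sorted res.1 (fun x => x)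

-- ===== PORT B =====
-- directions = ((-1,0),(0,1),(1,0),(0,-1))
def pvDirsB : List (Int × Int) := [(-1, 0), (0, 1), (1, 0), (0, -1)]

-- B's helper step(r, c, d): read the cell, turn, move with wrap-around
def pvStepB (grid : List String) (row col r c d : Int) : Int × Int × Int :=
  let d' := if pvChar grid r c = 'L' then PySem.Int.mod (d - 1) 4
            else if pvChar grid r c = 'R' then PySem.Int.mod (d + 1) 4
            else d
  let dir := pvDirsB.getD d'.toNat (0, 0)
  (PySem.Int.mod (r + dir.1) row, PySem.Int.mod (c + dir.2) col, d')

-- Python's lexicographic tuple comparison state < (r, c, d)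
def pvTupLt (a b : Int × Int × Int) : Bool :=
  decide (a.1 < b.1) || (a.1 == b.1 &&
    (decide (a.2.1 < b.2.1) || (a.2.1 == b.2.1 && decide (a.2.2 < b.2.2))))

-- B's while-loop: stop with the length on return to the start, give up on a smaller state;
-- fuel (row*col*4)+1 bounds it: the walk returns to its start within the cycle length
def pvWalk (grid : List String) (row col : Int) (s0 : Int × Int × Int) :
    Nat → (Int × Int × Int) → Int → Option Int
  | 0, _, _ => none
  | f + 1, st, len =>
    if st = s0 then some len
    else if pvTupLt st s0 then none
    else pvWalk grid row col s0 f (pvStepB grid row col st.1 st.2.1 st.2.2) (len + 1)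

def solution_alt (grid : List String) : List Int :=
  let row : Int := grid.length
  let col : Int := (grid.getD 0 "").toList.length   -- len(grid[0]); Pre_ excludes grid = []
  let fuel := (row * col * 4).toNat + 1
  let ans :=
    (PySem.List.pyRange 0 row 1).foldl (fun acc r =>
      (PySem.List.pyRange 0 col 1).foldl (fun acc c =>
        (PySem.List.pyRange 0 4 1).foldl (fun acc d =>
          match pvWalk grid row col (r, c, d) fuel (pvStepB grid row col r c d) 1 with
          | some len => acc ++ [len]
          | none => acc) acc) acc) []
  PySem.List.sorted ans (fun x => x)

-- ===== PRECONDITION & SPEC =====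
-- Pre_ excludes exactly the inputs where Python A raises IndexError: the empty grid
-- (len(grid[0])) and ragged grids with some row shorter than row 0 (grid[r][c]).
def Pre_solution (grid : List String) : Prop :=
  grid ≠ [] ∧ ∀ s ∈ grid, (grid.headD "").toList.length ≤ s.toList.length
instance (grid : List String) : Decidable (Pre_solution grid) := by
  unfold Pre_solution; infer_instance

def pvWitness_solution : List String := ["SL", "LR"]

def Spec_solution (grid : List String) (out : List Int) : Prop := out = solution_alt grid
instance (grid : List String) (out : List Int) : Decidable (Spec_solution grid out) := by
  unfold Spec_solution; infer_instance

-- ===== CLAIM (what is proved, stated in full; the proofs are below) =====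
def Claim_equal_solution : Prop :=
  ∀ (grid : List String), Dom_solution grid → Pre_solution grid → Spec_solution grid (solution grid)

-- ===== LEMMAS AND PROOFS =====

-- B's step is the same state transition as A's loop body
theorem pvStepB_eq (grid : List String) (row col r c d : Int) :
    pvStepB grid row col r c d = pvStepA grid row col r c d := rfl

-- the transition as one function on states
def pvF (grid : List String) (row col : Int) (t : Int × Int × Int) : Int × Int × Int :=
  pvStepA grid row col t.1 t.2.1 t.2.2

def pvValid (row col : Int) (t : Int × Int × Int) : Prop :=
  0 ≤ t.1 ∧ t.1 < row ∧ 0 ≤ t.2.1 ∧ t.2.1 < col ∧ 0 ≤ t.2.2 ∧ t.2.2 < 4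

-- flat encoding of a state
def pvEnc (col : Int) (t : Int × Int × Int) : Int := t.1 * col * 4 + t.2.1 * 4 + t.2.2

-- shape of A's 3D visited structure
def pvShape (row col : Int) (v : List (List (List Bool))) : Prop :=
  v.length = row.toNat ∧ ∀ rl ∈ v, rl.length = col.toNat ∧ ∀ cl ∈ rl, cl.length = 4

theorem pv_getD_set {α : Type} (l : List α) (i j : Nat) (v dflt : α) (h : i < l.length) :
    (l.set i v).getD j dflt = if j = i then v else l.getD j dflt := by
  rcases eq_or_ne j i with hij | hij
  · subst hij; simp [List.getD_eq_getElem?_getD, h]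
  · simp [List.getD_eq_getElem?_getD, hij, Ne.symm hij]

theorem pvEnc_bounds {row col : Int} {t : Int × Int × Int} (h : pvValid row col t) :
    0 ≤ pvEnc col t ∧ pvEnc col t < row * col * 4 := by
  obtain ⟨h1, h2, h3, h4, h5, h6⟩ := h
  have hrc : 0 ≤ t.1 * col := mul_nonneg h1 (by omega)
  constructor
  · unfold pvEnc; nlinarith
  · unfold pvEnc; nlinarith

theorem pvEnc_inj {row col : Int} {t t' : Int × Int × Int} (h : pvValid row col t)
    (h' : pvValid row col t') (he : pvEnc col t = pvEnc col t') : t = t' := by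
  obtain ⟨h1, h2, h3, h4, h5, h6⟩ := h
  obtain ⟨g1, g2, g3, g4, g5, g6⟩ := h'
  unfold pvEnc at he
  have hr : t.1 = t'.1 := by nlinarith
  have hc : t.2.1 = t'.2.1 := by nlinarith
  have hd : t.2.2 = t'.2.2 := by nlinarith
  exact Prod.ext hr (Prod.ext hc hd)

-- lexicographic order on valid states is the order of their encodings
theorem pvTupLt_iff {row col : Int} {a b : Int × Int × Int} (ha : pvValid row col a)
    (hb : pvValid row col b) : pvTupLt a b = true ↔ pvEnc col a < pvEnc col b := by
  obtain ⟨a1, a2, a3, a4, a5, a6⟩ := ha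
  obtain ⟨b1, b2, b3, b4, b5, b6⟩ := hb
  simp only [pvTupLt, pvEnc, Bool.or_eq_true, Bool.and_eq_true, beq_iff_eq, decide_eq_true_eq]
  constructor
  · rintro (h | ⟨h, (h2 | ⟨h3, h4⟩)⟩)
    · nlinarith
    · nlinarith
    · nlinarith
  · intro h
    rcases lt_trichotomy a.1 b.1 with h1 | h1 | h1
    · exact Or.inl h1
    · rcases lt_trichotomy a.2.1 b.2.1 with h2 | h2 | h2
      · exact Or.inr ⟨h1, Or.inl h2⟩
      · rcases lt_trichotomy a.2.2 b.2.2 with h3 | h3 | h3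
        · exact Or.inr ⟨h1, Or.inr ⟨h2, h3⟩⟩
        · exfalso; rw [h1, h2, h3] at h; exact lt_irrefl _ h
        · exfalso; nlinarith
      · exfalso; nlinarith
    · exfalso; nlinarith

-- the turn result is again a direction in [0,4)
theorem pvTurn_bounds (ch : Prop) [Decidable ch] (ch2 : Prop) [Decidable ch2] {d : Int}
    (hd : 0 ≤ d) (hdd : d < 4) :
    0 ≤ (if ch then PySem.Int.mod (d - 1) 4 else if ch2 then PySem.Int.mod (d + 1) 4 else d) ∧
    (if ch then PySem.Int.mod (d - 1) 4 else if ch2 then PySem.Int.mod (d + 1) 4 else d) < 4 := by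
  split_ifs <;>
    first
      | exact ⟨PySem.Int.mod_nonneg _ (by omega), PySem.Int.mod_lt _ (by omega)⟩
      | exact ⟨hd, hdd⟩

theorem pvF_valid {grid : List String} {row col : Int} {t : Int × Int × Int}
    (h : pvValid row col t) : pvValid row col (pvF grid row col t) := by
  obtain ⟨h1, h2, h3, h4, h5, h6⟩ := h
  have hrow : 0 < row := by omega
  have hcol : 0 < col := by omega
  unfold pvF pvStepA pvValid
  refine ⟨PySem.Int.mod_nonneg _ hrow, PySem.Int.mod_lt _ hrow,
    PySem.Int.mod_nonneg _ hcol, PySem.Int.mod_lt _ hcol, ?_, ?_⟩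
  · exact (pvTurn_bounds _ _ h5 h6).1
  · exact (pvTurn_bounds _ _ h5 h6).2

theorem pvIter_valid {grid : List String} {row col : Int} {t : Int × Int × Int}
    (h : pvValid row col t) (k : Nat) : pvValid row col ((pvF grid row col)^[k] t) := by
  induction k with
  | zero => exact h
  | succ k ih => rw [Function.iterate_succ_apply']; exact pvF_valid ih

-- shifting by a and back modulo m is the identity on [0, m)
theorem pv_mod_shift {x a m : Int} (hm : 0 < m) (h0 : 0 ≤ x) (h1 : x < m) :
    PySem.Int.mod (PySem.Int.mod (x + a) m - a) m = x := by
  rw [PySem.Int.mod_eq_emod_of_pos hm, PySem.Int.mod_eq_emod_of_pos hm]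
  rw [Int.sub_emod ((x + a) % m), Int.emod_emod_of_dvd _ dvd_rfl, ← Int.sub_emod]
  simpa using Int.emod_eq_of_lt h0 h1

-- explicit inverse of the transition (on valid states)
def pvG (grid : List String) (row col : Int) (t : Int × Int × Int) : Int × Int × Int :=
  let dir := pvDirs.getD t.2.2.toNat (0, 0)
  let r := PySem.Int.mod (t.1 - dir.1) row
  let c := PySem.Int.mod (t.2.1 - dir.2) col
  let d := if pvChar grid r c = 'L' then PySem.Int.mod (t.2.2 + 1) 4
           else if pvChar grid r c = 'R' then PySem.Int.mod (t.2.2 - 1) 4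
           else t.2.2
  (r, c, d)

theorem pvG_F {grid : List String} {row col : Int} {t : Int × Int × Int}
    (h : pvValid row col t) : pvG grid row col (pvF grid row col t) = t := by
  obtain ⟨h1, h2, h3, h4, h5, h6⟩ := h
  have hrow : 0 < row := by omega
  have hcol : 0 < col := by omega
  show pvG grid row col (pvStepA grid row col t.1 t.2.1 t.2.2) = t
  unfold pvStepA pvG
  simp only []
  set d' := if pvChar grid t.1 t.2.1 = 'L' then PySem.Int.mod (t.2.2 - 1) 4
            else if pvChar grid t.1 t.2.1 = 'R' then PySem.Int.mod (t.2.2 + 1) 4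
            else t.2.2 with hd'
  have hr0 : PySem.Int.mod
      (PySem.Int.mod (t.1 + (pvDirs.getD d'.toNat (0, 0)).1) row - (pvDirs.getD d'.toNat (0, 0)).1)
      row = t.1 := pv_mod_shift hrow h1 h2
  have hc0 : PySem.Int.mod
      (PySem.Int.mod (t.2.1 + (pvDirs.getD d'.toNat (0, 0)).2) col - (pvDirs.getD d'.toNat (0, 0)).2)
      col = t.2.1 := pv_mod_shift hcol h3 h4
  rw [hr0, hc0]
  by_cases hL : pvChar grid t.1 t.2.1 = 'L'
  · rw [if_pos hL]
    rw [hd', if_pos hL]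
    have hmm : PySem.Int.mod (PySem.Int.mod (t.2.2 - 1) 4 + 1) 4 = t.2.2 := by
      have := pv_mod_shift (x := t.2.2) (a := -1) (m := 4) (by norm_num) h5 h6
      simpa [sub_neg_eq_add] using this
    rw [hmm]
  · rw [if_neg hL, hd', if_neg hL]
    by_cases hR : pvChar grid t.1 t.2.1 = 'R'
    · rw [if_pos hR, if_pos hR]
      have hmm : PySem.Int.mod (PySem.Int.mod (t.2.2 + 1) 4 - 1) 4 = t.2.2 :=
        pv_mod_shift (by norm_num) h5 h6
      rw [hmm]
    · rw [if_neg hR, if_neg hR]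

theorem pvF_inj {grid : List String} {row col : Int} {s t : Int × Int × Int}
    (hs : pvValid row col s) (ht : pvValid row col t)
    (h : pvF grid row col s = pvF grid row col t) : s = t := by
  rw [← pvG_F hs, ← pvG_F ht, h]

theorem pvIter_cancel {grid : List String} {row col : Int} {a b : Int × Int × Int}
    (ha : pvValid row col a) (hb : pvValid row col b) (i : Nat)
    (h : (pvF grid row col)^[i] a = (pvF grid row col)^[i] b) : a = b := by
  induction i generalizing a b with
  | zero => exact h
  | succ i ih =>
    rw [Function.iterate_succ_apply, Function.iterate_succ_apply] at h
    exact pvF_inj ha hb (ih (pvF_valid ha) (pvF_valid hb) h)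

-- every valid state is periodic, with minimal period in (0, row*col*4]
theorem pvPeriodic {grid : List String} {row col : Int} {t : Int × Int × Int}
    (h : pvValid row col t) :
    0 < Function.minimalPeriod (pvF grid row col) t ∧
      Function.minimalPeriod (pvF grid row col) t ≤ (row * col * 4).toNat ∧
      (pvF grid row col)^[Function.minimalPeriod (pvF grid row col) t] t = t := by
  have key : ∃ p, 0 < p ∧ p ≤ (row * col * 4).toNat ∧
      Function.IsPeriodicPt (pvF grid row col) p t := by
    have hmaps : ∀ k ∈ Finset.range ((row * col * 4).toNat + 1),
        pvEnc col ((pvF grid row col)^[k] t) ∈ Finset.Ico (0 : Int) (row * col * 4) := by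
      intro k _
      have hb := pvEnc_bounds (pvIter_valid (grid := grid) h k)
      exact Finset.mem_Ico.2 ⟨hb.1, hb.2⟩
    have hcard : (Finset.Ico (0 : Int) (row * col * 4)).card <
        (Finset.range ((row * col * 4).toNat + 1)).card := by
      rw [Int.card_Ico, Finset.card_range]
      omega
    obtain ⟨i, hi, j, hj, hij, he⟩ :=
      Finset.exists_ne_map_eq_of_card_lt_of_maps_to hcard hmaps
    simp only [Finset.mem_range] at hi hj
    have hfix : ∀ i j : Nat, i < j → j < (row * col * 4).toNat + 1 →
        pvEnc col ((pvF grid row col)^[i] t) = pvEnc col ((pvF grid row col)^[j] t) →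
        ∃ p, 0 < p ∧ p ≤ (row * col * 4).toNat ∧
          Function.IsPeriodicPt (pvF grid row col) p t := by
      intro i j hlt hjn he
      have heq : (pvF grid row col)^[i] t = (pvF grid row col)^[j] t :=
        pvEnc_inj (pvIter_valid h i) (pvIter_valid h j) he
      have hsplit : i + (j - i) = j := by omega
      rw [← hsplit, Function.iterate_add_apply] at heq
      have hp : (pvF grid row col)^[j - i] t = t :=
        (pvIter_cancel (pvIter_valid h (j - i)) h i heq.symm)
      exact ⟨j - i, by omega, by omega, hp⟩
    rcases lt_or_gt_of_ne hij with hlt | hlt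
    · exact hfix i j hlt hj he
    · exact hfix j i hlt hi he.symm
  obtain ⟨p, hp0, hpn, hp⟩ := key
  refine ⟨hp.minimalPeriod_pos hp0, le_trans (hp.minimalPeriod_le hp0) hpn,
    Function.iterate_minimalPeriod⟩

theorem pvPer_iterate {grid : List String} {row col : Int} {t : Int × Int × Int}
    (h : pvValid row col t) (k : Nat) :
    Function.minimalPeriod (pvF grid row col) ((pvF grid row col)^[k] t) =
      Function.minimalPeriod (pvF grid row col) t := by
  have hper : t ∈ Function.periodicPts (pvF grid row col) :=
    ⟨_, (pvPeriodic h).1, (pvPeriodic h).2.2⟩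
  induction k with
  | zero => rfl
  | succ k ih =>
    rw [Function.iterate_succ_apply', Function.minimalPeriod_apply, ih]
    obtain ⟨n, hn, hp⟩ := hper
    exact ⟨n, hn, hp.apply_iterate k⟩

-- membership in the cycle of x
def pvInOrb (grid : List String) (row col : Int) (x y : Int × Int × Int) : Prop :=
  ∃ k < Function.minimalPeriod (pvF grid row col) x, (pvF grid row col)^[k] x = y

-- x is in the cycle of any of its iterates
theorem pvOrbit_sym {grid : List String} {row col : Int} {x : Int × Int × Int}
    (hx : pvValid row col x) (j : Nat) :
    ∃ j', (pvF grid row col)^[j'] ((pvF grid row col)^[j] x) = x := by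
  obtain ⟨hL0, _, hLfix⟩ := pvPeriodic (grid := grid) hx
  set L := Function.minimalPeriod (pvF grid row col) x with hLdef
  refine ⟨L - j % L, ?_⟩
  rw [← Function.iterate_add_apply]
  have hdm := Nat.div_add_mod j L
  have hmod : j % L < L := Nat.mod_lt _ hL0
  have hform : L - j % L + j = L * (1 + j / L) := by
    have h2 : L * (1 + j / L) = L + L * (j / L) := by ring
    omega
  rw [hform, ← Function.iterate_mod_minimalPeriod_eq (n := L * (1 + j / L)), ← hLdef,
    Nat.mul_mod_right]
  rfl

-- two states on the same cycle have the same cycle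
theorem pvInOrb_congr {grid : List String} {row col : Int} {x s : Int × Int × Int}
    (hx : pvValid row col x) (k0 : Nat) (h : (pvF grid row col)^[k0] x = s) :
    ∀ y, pvInOrb grid row col x y ↔ pvInOrb grid row col s y := by
  have hs : pvValid row col s := h ▸ pvIter_valid hx k0
  have hperx := pvPeriodic (grid := grid) hx
  have hpers : Function.minimalPeriod (pvF grid row col) s =
      Function.minimalPeriod (pvF grid row col) x := by
    rw [← h, pvPer_iterate hx]
  obtain ⟨j0, hj0⟩ := pvOrbit_sym hx k0
  rw [h] at hj0
  intro y
  constructor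
  · rintro ⟨k, hk, rfl⟩
    refine ⟨(k + j0) % Function.minimalPeriod (pvF grid row col) s, ?_, ?_⟩
    · exact Nat.mod_lt _ (by rw [hpers]; exact hperx.1)
    · rw [Function.iterate_mod_minimalPeriod_eq, Function.iterate_add_apply, hj0]
  · rintro ⟨k, hk, rfl⟩
    refine ⟨(k + k0) % Function.minimalPeriod (pvF grid row col) x, ?_, ?_⟩
    · exact Nat.mod_lt _ hperx.1
    · rw [Function.iterate_mod_minimalPeriod_eq, Function.iterate_add_apply, h]

-- the shape lemmas for A's 3D visited structure
theorem pvShape_set3 {row col : Int} {v : List (List (List Bool))} {r c d : Int}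
    (hs : pvShape row col v) : pvShape row col (pvSet3 v r c d) := by
  obtain ⟨hl, hm⟩ := hs
  by_cases hr : r.toNat < v.length
  · refine ⟨by simpa [pvSet3] using hl, ?_⟩
    intro rl hrl
    have hmem0 : v.getD r.toNat [] ∈ v := by
      rw [List.getD_eq_getElem _ _ hr]; exact List.getElem_mem hr
    obtain ⟨hcl, hin⟩ := hm _ hmem0
    rcases List.mem_or_eq_of_mem_set hrl with hmem | heq
    · exact hm rl hmem
    · subst heq
      by_cases hc : c.toNat < (v.getD r.toNat []).length
      · refine ⟨by simpa using hcl, ?_⟩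
        intro cl hcl2
        rcases List.mem_or_eq_of_mem_set hcl2 with hmem2 | heq2
        · exact hin cl hmem2
        · subst heq2
          have hmem3 : (v.getD r.toNat []).getD c.toNat [] ∈ v.getD r.toNat [] := by
            rw [List.getD_eq_getElem _ _ hc]; exact List.getElem_mem hc
          simpa using hin _ hmem3
      · rw [List.set_eq_of_length_le (by omega)]
        exact ⟨hcl, hin⟩
  · unfold pvSet3
    rw [List.set_eq_of_length_le (by omega)]
    exact ⟨hl, hm⟩

-- reading after marking, on the 3D side
theorem pvGet3_set3 {row col : Int} {v : List (List (List Bool))} {t t' : Int × Int × Int}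
    (hs : pvShape row col v) (h : pvValid row col t) (h' : pvValid row col t') :
    pvGet3 (pvSet3 v t.1 t.2.1 t.2.2) t'.1 t'.2.1 t'.2.2 =
      if t = t' then true else pvGet3 v t'.1 t'.2.1 t'.2.2 := by
  obtain ⟨hl, hm⟩ := hs
  obtain ⟨h1, h2, h3, h4, h5, h6⟩ := h
  obtain ⟨g1, g2, g3, g4, g5, g6⟩ := h'
  have hr : t.1.toNat < v.length := by omega
  have hrow0 : v.getD t.1.toNat [] ∈ v := by
    rw [List.getD_eq_getElem _ _ hr]; exact List.getElem_mem hr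
  obtain ⟨hcl, hin⟩ := hm _ hrow0
  have hc : t.2.1.toNat < (v.getD t.1.toNat []).length := by omega
  have hcell : (v.getD t.1.toNat []).getD t.2.1.toNat [] ∈ v.getD t.1.toNat [] := by
    rw [List.getD_eq_getElem _ _ hc]; exact List.getElem_mem hc
  have hd : t.2.2.toNat < ((v.getD t.1.toNat []).getD t.2.1.toNat []).length := by
    rw [hin _ hcell]; omega
  unfold pvGet3 pvSet3
  rw [pv_getD_set _ _ _ _ _ hr]
  by_cases e1 : t'.1.toNat = t.1.toNat
  · rw [if_pos e1, pv_getD_set _ _ _ _ _ hc]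
    have er : t.1 = t'.1 := by omega
    by_cases e2 : t'.2.1.toNat = t.2.1.toNat
    · rw [if_pos e2, pv_getD_set _ _ _ _ _ hd]
      have ec : t.2.1 = t'.2.1 := by omega
      by_cases e3 : t'.2.2.toNat = t.2.2.toNat
      · have ed : t.2.2 = t'.2.2 := by omega
        rw [if_pos e3, if_pos (Prod.ext er (Prod.ext ec ed))]
      · have ed : t ≠ t' := by
          intro hteq; apply e3; rw [hteq]
        rw [if_neg e3, if_neg ed, ← er, ← ec]
    · have ec : t ≠ t' := by
        intro hteq; apply e2; rw [hteq]
      rw [if_neg e2, if_neg ec, ← er]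
  · have er : t ≠ t' := by
      intro hteq; apply e1; rw [hteq]
    rw [if_neg e1, if_neg er]

-- marking the first j states of the walk from s
def pvMark (grid : List String) (row col : Int) (v : List (List (List Bool)))
    (s : Int × Int × Int) : Nat → List (List (List Bool))
  | 0 => v
  | j + 1 =>
    pvSet3 (pvMark grid row col v s j) ((pvF grid row col)^[j] s).1
      ((pvF grid row col)^[j] s).2.1 ((pvF grid row col)^[j] s).2.2

theorem pvMark_shape {grid : List String} {row col : Int} {v : List (List (List Bool))}
    {s : Int × Int × Int} (hs : pvShape row col v) (j : Nat) :
    pvShape row col (pvMark grid row col v s j) := by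
  induction j with
  | zero => exact hs
  | succ j ih => exact pvShape_set3 ih

theorem pvMark_get {grid : List String} {row col : Int} {v : List (List (List Bool))}
    {s : Int × Int × Int} (hs : pvShape row col v) (hv : pvValid row col s) (j : Nat)
    {x : Int × Int × Int} (hx : pvValid row col x) :
    pvGet3 (pvMark grid row col v s j) x.1 x.2.1 x.2.2 = true ↔
      (pvGet3 v x.1 x.2.1 x.2.2 = true ∨ ∃ i < j, (pvF grid row col)^[i] s = x) := by
  induction j with
  | zero => simp [pvMark]
  | succ j ih =>
    rw [pvMark, pvGet3_set3 (pvMark_shape hs j) (pvIter_valid hv j) hx]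
    by_cases he : (pvF grid row col)^[j] s = x
    · simp only [he]
      constructor
      · intro _; exact Or.inr ⟨j, by omega, he⟩
      · intro _; rfl
    · rw [if_neg he, ih]
      constructor
      · rintro (h | ⟨i, hi, hie⟩)
        · exact Or.inl h
        · exact Or.inr ⟨i, by omega, hie⟩
      · rintro (h | ⟨i, hi, hie⟩)
        · exact Or.inl h
        · refine Or.inr ⟨i, ?_, hie⟩
          rcases Nat.lt_succ_iff_lt_or_eq.1 hi with h' | h'
          · exact h'
          · exact absurd (h' ▸ hie) he

-- the invariant carried along the triple scan: a state is visited iff its cycle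
-- contains a state with encoding below the current bound
def pvInv (grid : List String) (row col : Int) (v : List (List (List Bool))) (b : Int) : Prop :=
  pvShape row col v ∧
    ∀ x, pvValid row col x →
      (pvGet3 v x.1 x.2.1 x.2.2 = true ↔
        ∃ k < Function.minimalPeriod (pvF grid row col) x,
          pvEnc col ((pvF grid row col)^[k] x) < b)

-- A's dfs from an unvisited cycle minimum marks exactly the cycle and returns its length
theorem pvDfs_run {grid : List String} {row col : Int} {v : List (List (List Bool))}
    {s : Int × Int × Int} (hv : pvValid row col s)
    (hinv : pvInv grid row col v (pvEnc col s))
    (hmin : ∀ k < Function.minimalPeriod (pvF grid row col) s,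
      ¬ pvEnc col ((pvF grid row col)^[k] s) < pvEnc col s) :
    ∀ (fuel j : Nat), j ≤ Function.minimalPeriod (pvF grid row col) s →
      Function.minimalPeriod (pvF grid row col) s - j < fuel →
      pvDfsA grid row col fuel (pvMark grid row col v s j) ((pvF grid row col)^[j] s).1
          ((pvF grid row col)^[j] s).2.1 ((pvF grid row col)^[j] s).2.2 (j : Int) =
        ((Function.minimalPeriod (pvF grid row col) s : Int),
          pvMark grid row col v s (Function.minimalPeriod (pvF grid row col) s)) := by
  obtain ⟨hL0, hLn, hLfix⟩ := pvPeriodic (grid := grid) hv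
  set L := Function.minimalPeriod (pvF grid row col) s with hLdef
  intro fuel
  induction fuel with
  | zero => intro j _ hlt; exact absurd hlt (Nat.not_lt_zero _)
  | succ fuel ih =>
    intro j hj hlt
    rcases eq_or_lt_of_le hj with hje | hjlt
    · subst hje
      have hget : pvGet3 (pvMark grid row col v s L) ((pvF grid row col)^[L] s).1
          ((pvF grid row col)^[L] s).2.1 ((pvF grid row col)^[L] s).2.2 = true := by
        rw [pvMark_get hinv.1 hv L (pvIter_valid hv L)]
        exact Or.inr ⟨0, hL0, by rw [Function.iterate_zero_apply]; exact hLfix.symm⟩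
      simp only [pvDfsA, hget, if_true]
    · have hget : pvGet3 (pvMark grid row col v s j) ((pvF grid row col)^[j] s).1
          ((pvF grid row col)^[j] s).2.1 ((pvF grid row col)^[j] s).2.2 = false := by
        rw [Bool.eq_false_iff]
        intro htrue
        rw [pvMark_get hinv.1 hv j (pvIter_valid hv j)] at htrue
        rcases htrue with hbase | ⟨i, hi, hie⟩
        · rw [hinv.2 _ (pvIter_valid hv j)] at hbase
          obtain ⟨k, hk, hklt⟩ := hbase
          rw [pvPer_iterate hv j, ← hLdef] at hk
          rw [← Function.iterate_add_apply] at hklt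
          have hmod : (pvF grid row col)^[(k + j) % L] s = (pvF grid row col)^[k + j] s := by
            rw [hLdef, Function.iterate_mod_minimalPeriod_eq]
          exact hmin ((k + j) % L) (Nat.mod_lt _ hL0) (by rw [hmod]; exact hklt)
        · have hsplit : j - i + i = j := by omega
          have heq : (pvF grid row col)^[i] ((pvF grid row col)^[j - i] s) =
              (pvF grid row col)^[i] s := by
            rw [← Function.iterate_add_apply, Nat.add_comm i (j - i), hsplit]
            exact hie.symm
          have hfix : (pvF grid row col)^[j - i] s = s :=
            pvIter_cancel (pvIter_valid hv (j - i)) hv i heq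
          have : ¬ Function.IsPeriodicPt (pvF grid row col) (j - i) s :=
            Function.not_isPeriodicPt_of_pos_of_lt_minimalPeriod (by omega) (by omega)
          exact this hfix
      simp only [pvDfsA, hget, Bool.false_eq_true, if_false]
      have hstep : pvStepA grid row col ((pvF grid row col)^[j] s).1
          ((pvF grid row col)^[j] s).2.1 ((pvF grid row col)^[j] s).2.2 =
            (pvF grid row col)^[j + 1] s := by
        rw [Function.iterate_succ_apply']; rfl
      rw [hstep]
      have hcast : (j : Int) + 1 = ((j + 1 : Nat) : Int) := by push_cast; ring
      rw [hcast]
      exact ih (j + 1) hjlt (by omega)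

-- B's walk returns the cycle length at the cycle minimum and nothing elsewhere
theorem pvWalk_run {grid : List String} {row col : Int} {s : Int × Int × Int}
    (hv : pvValid row col s) :
    ∀ (fuel j : Nat), 1 ≤ j → j ≤ Function.minimalPeriod (pvF grid row col) s →
      Function.minimalPeriod (pvF grid row col) s - j < fuel →
      (∀ i, 1 ≤ i → i < j → ¬ pvTupLt ((pvF grid row col)^[i] s) s = true) →
      pvWalk grid row col s fuel ((pvF grid row col)^[j] s) (j : Int) =
        (if ∀ i < Function.minimalPeriod (pvF grid row col) s,
            1 ≤ i → ¬ pvTupLt ((pvF grid row col)^[i] s) s = true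
         then some ((Function.minimalPeriod (pvF grid row col) s : Int)) else none) := by
  obtain ⟨hL0, hLn, hLfix⟩ := pvPeriodic (grid := grid) hv
  set L := Function.minimalPeriod (pvF grid row col) s with hLdef
  intro fuel
  induction fuel with
  | zero => intro j _ _ hlt _; exact absurd hlt (Nat.not_lt_zero _)
  | succ fuel ih =>
    intro j hj1 hj hlt hpref
    rcases eq_or_lt_of_le hj with hje | hjlt
    · subst hje
      have hcond : ∀ i < L, 1 ≤ i → ¬ pvTupLt ((pvF grid row col)^[i] s) s = true :=
        fun i hi h1 => hpref i h1 hi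
      rw [if_pos hcond]
      simp [pvWalk, hLfix]
    · have hne : (pvF grid row col)^[j] s ≠ s := by
        intro hfix
        exact Function.not_isPeriodicPt_of_pos_of_lt_minimalPeriod
          (by omega) (by omega) hfix
      simp only [pvWalk, if_neg hne]
      by_cases hltb : pvTupLt ((pvF grid row col)^[j] s) s = true
      · rw [if_pos hltb, if_neg ?_]
        intro hcond
        exact hcond j hjlt hj1 hltb
      · rw [if_neg hltb, pvStepB_eq]
        have hstep : pvStepA grid row col ((pvF grid row col)^[j] s).1
            ((pvF grid row col)^[j] s).2.1 ((pvF grid row col)^[j] s).2.2 =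
              (pvF grid row col)^[j + 1] s := by
          rw [Function.iterate_succ_apply']; rfl
        rw [hstep]
        have hcast : (j : Int) + 1 = ((j + 1 : Nat) : Int) := by push_cast; ring
        rw [hcast]
        refine ih (j + 1) (by omega) hjlt (by omega) ?_
        intro i h1 hij
        rcases Nat.lt_succ_iff_lt_or_eq.1 hij with h' | h'
        · exact hpref i h1 h'
        · subst h'; exact hltb

-- the triple scan enumerates exactly the encodings 0, 1, …, row*col*4 - 1 in order
def pvTriples (row col : Int) : List (Int × Int × Int) :=
  (PySem.List.pyRange 0 row 1).flatMap (fun r =>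
    (PySem.List.pyRange 0 col 1).flatMap (fun c =>
      (PySem.List.pyRange 0 4 1).map (fun d => (r, c, d))))

theorem pvTriples_mem {row col : Int} {t : Int × Int × Int} (h : t ∈ pvTriples row col) :
    pvValid row col t := by
  simp only [pvTriples, List.mem_flatMap, List.mem_map, PySem.List.mem_pyRange_one] at h
  obtain ⟨r, hr, c, hc, d, hd, rfl⟩ := h
  exact ⟨hr.1, hr.2, hc.1, hc.2, hd.1, hd.2⟩

theorem pv_range_mul (a b : Nat) :
    List.range (a * b) =
      (List.range a).flatMap (fun i => (List.range b).map (fun j => i * b + j)) := by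
  induction a with
  | zero => simp
  | succ a ih =>
    rw [Nat.succ_mul, List.range_add, ih, List.range_succ, List.flatMap_append]
    simp [Nat.add_comm]

theorem pvTriples_enc {row col : Int} (hr : 0 ≤ row) (hc : 0 ≤ col) :
    (pvTriples row col).map (pvEnc col) = PySem.List.pyRange 0 (row * col * 4) 1 := by
  obtain ⟨m, rfl⟩ : ∃ m : Nat, row = (m : Int) := ⟨row.toNat, (Int.toNat_of_nonneg hr).symm⟩
  obtain ⟨k, rfl⟩ : ∃ k : Nat, col = (k : Int) := ⟨col.toNat, (Int.toNat_of_nonneg hc).symm⟩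
  have hn : ((m : Int) * k * 4) = ((m * k * 4 : Nat) : Int) := by push_cast; ring
  have h4 : (4 : Int) = ((4 : Nat) : Int) := rfl
  rw [hn, PySem.List.pyRange_zero_nat, pv_range_mul (m * k) 4, pv_range_mul m k]
  unfold pvTriples
  rw [h4, PySem.List.pyRange_zero_nat, PySem.List.pyRange_zero_nat, PySem.List.pyRange_zero_nat]
  simp only [List.map_flatMap, List.flatMap_map, List.map_map, List.flatMap_assoc]
  apply List.flatMap_congr
  intro r hr'
  apply List.flatMap_congr
  intro c hc'
  apply List.map_congr_left
  intro d hd'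
  simp only [Function.comp_apply, pvEnc]
  push_cast
  ring

-- the two nested scans agree step by step under the invariant
theorem pvFold_bisim (grid : List String) (row col : Int) (fuel : Nat)
    (hfuel : (row * col * 4).toNat < fuel) :
    ∀ (L : List (Int × Int × Int)) (b : Int), 0 ≤ b →
      L.map (pvEnc col) = PySem.List.pyRange b (row * col * 4) 1 →
      (∀ t ∈ L, pvValid row col t) →
      ∀ (ans : List Int) (v : List (List (List Bool))), pvInv grid row col v b →
      (L.foldl (fun acc t => pvBodyA grid row col fuel acc t.1 t.2.1 t.2.2) (ans, v)).1 =
        L.foldl (fun acc t =>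
          match pvWalk grid row col t fuel (pvStepB grid row col t.1 t.2.1 t.2.2) 1 with
          | some len => acc ++ [len]
          | none => acc) ans := by
  intro L
  induction L with
  | nil => intro _ _ _ _ ans v _; rfl
  | cons t L' ih =>
    intro b hb0 hmap hval ans v hinv
    have hvt : pvValid row col t := hval t List.mem_cons_self
    have hbn : b < row * col * 4 := by
      by_contra hge
      rw [PySem.List.pyRange_one_eq_nil (by omega)] at hmap
      exact List.cons_ne_nil _ _ (List.map_eq_nil_iff.1 hmap)
    rw [PySem.List.pyRange_one_cons (by omega)] at hmap
    simp only [List.map_cons, List.cons.injEq] at hmap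
    obtain ⟨henct, hmap'⟩ := hmap
    obtain ⟨hper1, hpern, hperfix⟩ := pvPeriodic (grid := grid) hvt
    have hperfuel : ∀ j : Nat, Function.minimalPeriod (pvF grid row col) t - j < fuel :=
      fun j => lt_of_le_of_lt (le_trans (Nat.sub_le _ _) hpern) hfuel
    simp only [List.foldl_cons]
    by_cases hvis : pvGet3 v t.1 t.2.1 t.2.2 = true
    · -- t's cycle was already counted: A skips, B's walk meets a smaller state
      obtain ⟨k, hk, hklt⟩ := (hinv.2 t hvt).1 hvis
      rw [← henct] at hklt
      have hk1 : 1 ≤ k := by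
        rcases Nat.eq_zero_or_pos k with h0 | h0
        · rw [h0, Function.iterate_zero_apply] at hklt; omega
        · exact h0
      have hwalk := pvWalk_run hvt fuel 1 le_rfl hper1 (hperfuel 1)
        (by intro i hi1 hi; omega)
      rw [Function.iterate_one] at hwalk
      have hcondF : ¬ ∀ i < Function.minimalPeriod (pvF grid row col) t,
          1 ≤ i → ¬ pvTupLt ((pvF grid row col)^[i] t) t = true := by
        intro hcond
        exact hcond k hk hk1 ((pvTupLt_iff (pvIter_valid hvt k) hvt).2 hklt)
      rw [if_neg hcondF, Nat.cast_one] at hwalk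
      have hstep1 : pvStepB grid row col t.1 t.2.1 t.2.2 = pvF grid row col t := rfl
      have e1 : pvBodyA grid row col fuel (ans, v) t.1 t.2.1 t.2.2 = (ans, v) := by
        simp [pvBodyA, hvis]
      have e2 : (match pvWalk grid row col t fuel (pvStepB grid row col t.1 t.2.1 t.2.2) 1 with
          | some len => ans ++ [len]
          | none => ans) = ans := by
        rw [hstep1, hwalk]
      rw [e1, e2]
      refine ih (b + 1) (by omega) hmap' (fun u hu => hval u (List.mem_cons_of_mem _ hu)) ans v
        ⟨hinv.1, ?_⟩
      intro x hx
      rw [hinv.2 x hx]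
      constructor
      · rintro ⟨m, hm, hmlt⟩; exact ⟨m, hm, by omega⟩
      · rintro ⟨m, hm, hmlt⟩
        rcases lt_or_ge (pvEnc col ((pvF grid row col)^[m] x)) b with hlt' | hge'
        · exact ⟨m, hm, hlt'⟩
        · have heqb : (pvF grid row col)^[m] x = t := by
            refine pvEnc_inj (pvIter_valid hx m) hvt ?_
            rw [henct]; omega
          have hco := pvInOrb_congr hx m heqb
          have hmem : pvInOrb grid row col x ((pvF grid row col)^[k] t) :=
            (hco _).2 ⟨k, hk, rfl⟩
          obtain ⟨m', hm', hme'⟩ := hmem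
          exact ⟨m', hm', by rw [hme']; omega⟩
    · -- t is the first state of its cycle: A's dfs and B's walk both yield the length
      have hmin : ∀ k < Function.minimalPeriod (pvF grid row col) t,
          ¬ pvEnc col ((pvF grid row col)^[k] t) < pvEnc col t := by
        intro k hk hklt
        exact hvis ((hinv.2 t hvt).2 ⟨k, hk, by omega⟩)
      have hinvb : pvInv grid row col v (pvEnc col t) := by
        rw [henct]; exact hinv
      have hdfs := pvDfs_run hvt hinvb hmin fuel 0 (Nat.zero_le _) (hperfuel 0)
      simp only [Function.iterate_zero_apply, Nat.cast_zero, pvMark] at hdfs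
      have hwalk := pvWalk_run hvt fuel 1 le_rfl hper1 (hperfuel 1)
        (by intro i hi1 hi; omega)
      rw [Function.iterate_one] at hwalk
      have hcondT : ∀ i < Function.minimalPeriod (pvF grid row col) t,
          1 ≤ i → ¬ pvTupLt ((pvF grid row col)^[i] t) t = true := by
        intro i hi hi1 hlt'
        exact hmin i hi ((pvTupLt_iff (pvIter_valid hvt i) hvt).1 hlt')
      rw [if_pos hcondT, Nat.cast_one] at hwalk
      have hstep1 : pvStepB grid row col t.1 t.2.1 t.2.2 = pvF grid row col t := rfl
      have e1 : pvBodyA grid row col fuel (ans, v) t.1 t.2.1 t.2.2 =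
          (ans ++ [((Function.minimalPeriod (pvF grid row col) t : Nat) : Int)],
            pvMark grid row col v t (Function.minimalPeriod (pvF grid row col) t)) := by
        have hvisF : pvGet3 v t.1 t.2.1 t.2.2 = false := Bool.eq_false_iff.2 hvis
        simp only [pvBodyA, hvisF, Bool.false_eq_true, if_false, hdfs]
        rw [if_pos (Int.natCast_pos.mpr hper1)]
      have e2 : (match pvWalk grid row col t fuel (pvStepB grid row col t.1 t.2.1 t.2.2) 1 with
          | some len => ans ++ [len]
          | none => ans) =
          ans ++ [((Function.minimalPeriod (pvF grid row col) t : Nat) : Int)] := by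
        rw [hstep1, hwalk]
      rw [e1, e2]
      refine ih (b + 1) (by omega) hmap' (fun u hu => hval u (List.mem_cons_of_mem _ hu)) _ _
        ⟨pvMark_shape hinv.1 _, ?_⟩
      intro x hx
      rw [pvMark_get hinv.1 hvt _ hx, hinv.2 x hx]
      constructor
      · rintro (⟨m, hm, hmlt⟩ | ⟨i, hi, hie⟩)
        · exact ⟨m, hm, by omega⟩
        · have hco := pvInOrb_congr hvt i hie
          have hmem : pvInOrb grid row col x t := (hco _).1 ⟨0, hper1, rfl⟩
          obtain ⟨m', hm', hme'⟩ := hmem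
          exact ⟨m', hm', by rw [hme', henct]; omega⟩
      · rintro ⟨m, hm, hmlt⟩
        rcases lt_or_ge (pvEnc col ((pvF grid row col)^[m] x)) b with hlt' | hge'
        · exact Or.inl ⟨m, hm, hlt'⟩
        · have heqb : (pvF grid row col)^[m] x = t := by
            refine pvEnc_inj (pvIter_valid hx m) hvt ?_
            rw [henct]; omega
          have hco := pvInOrb_congr hx m heqb
          have hmem : pvInOrb grid row col t x :=
            (hco _).1 ⟨0, (pvPeriodic (grid := grid) hx).1, rfl⟩
          exact Or.inr hmem

theorem pv_getD_replicate {α : Type} (n k : Nat) (x dflt : α) :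
    (List.replicate n x).getD k dflt = if k < n then x else dflt := by
  rw [List.getD_eq_getElem?_getD, List.getElem?_replicate]
  split_ifs <;> rfl

theorem pvInv_init (grid : List String) (row col : Int) :
    pvInv grid row col
      (List.replicate row.toNat (List.replicate col.toNat (List.replicate 4 false))) 0 := by
  constructor
  · refine ⟨by simp, ?_⟩
    intro rl hrl
    rw [List.eq_of_mem_replicate hrl]
    refine ⟨by simp, ?_⟩
    intro cl hcl
    rw [List.eq_of_mem_replicate hcl]
    simp
  · intro x hx
    constructor
    · intro hget
      exfalso
      unfold pvGet3 at hget
      rw [pv_getD_replicate] at hget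
      split_ifs at hget
      · rw [pv_getD_replicate] at hget
        split_ifs at hget
        · rw [pv_getD_replicate] at hget
          split_ifs at hget
        · simp at hget
      · simp at hget
    · rintro ⟨k, hk, hlt⟩
      exact absurd hlt (by have := (pvEnc_bounds (pvIter_valid (grid := grid) hx k)).1; omega)

-- rewriting the three nested loops as one scan over the triple list, A's side and B's side
theorem pvA_fold_eq (grid : List String) (row col : Int) (fuel : Nat)
    (init : List Int × List (List (List Bool))) :
    (PySem.List.pyRange 0 row 1).foldl (fun acc r =>
      (PySem.List.pyRange 0 col 1).foldl (fun acc c =>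
        (PySem.List.pyRange 0 4 1).foldl (fun acc d =>
          pvBodyA grid row col fuel acc r c d) acc) acc) init =
    (pvTriples row col).foldl
      (fun acc t => pvBodyA grid row col fuel acc t.1 t.2.1 t.2.2) init := by
  simp [pvTriples, List.foldl_flatMap, List.foldl_map]

theorem pvB_fold_eq (grid : List String) (row col : Int) (fuel : Nat) (ans : List Int) :
    (PySem.List.pyRange 0 row 1).foldl (fun acc r =>
      (PySem.List.pyRange 0 col 1).foldl (fun acc c =>
        (PySem.List.pyRange 0 4 1).foldl (fun acc d =>
          match pvWalk grid row col (r, c, d) fuel (pvStepB grid row col r c d) 1 with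
          | some len => acc ++ [len]
          | none => acc) acc) acc) ans =
    (pvTriples row col).foldl (fun acc t =>
      match pvWalk grid row col t fuel (pvStepB grid row col t.1 t.2.1 t.2.2) 1 with
      | some len => acc ++ [len]
      | none => acc) ans := by
  simp [pvTriples, List.foldl_flatMap, List.foldl_map]

theorem pvMain (grid : List String) (row col : Int) (hr : 0 ≤ row) (hc : 0 ≤ col) :
    ((PySem.List.pyRange 0 row 1).foldl (fun acc r =>
      (PySem.List.pyRange 0 col 1).foldl (fun acc c =>
        (PySem.List.pyRange 0 4 1).foldl (fun acc d =>
          pvBodyA grid row col ((row * col * 4).toNat + 1) acc r c d) acc) acc)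
      ([], List.replicate row.toNat (List.replicate col.toNat (List.replicate 4 false)))).1 =
    (PySem.List.pyRange 0 row 1).foldl (fun acc r =>
      (PySem.List.pyRange 0 col 1).foldl (fun acc c =>
        (PySem.List.pyRange 0 4 1).foldl (fun acc d =>
          match pvWalk grid row col (r, c, d) ((row * col * 4).toNat + 1)
              (pvStepB grid row col r c d) 1 with
          | some len => acc ++ [len]
          | none => acc) acc) acc) [] := by
  rw [pvA_fold_eq, pvB_fold_eq]
  exact pvFold_bisim grid row col ((row * col * 4).toNat + 1) (Nat.lt_succ_self _)
    (pvTriples row col) 0 le_rfl (pvTriples_enc hr hc) (fun t ht => pvTriples_mem ht)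
    [] _ (pvInv_init grid row col)

-- ===== VERDICT (by name: the statement is the Claim_ definition above) =====
theorem solution_spec : Claim_equal_solution := by
  intro grid _ _
  unfold Spec_solution solution solution_alt
  simp only []
  rw [pvMain grid (grid.length : Int) ((grid.getD 0 "").toList.length : Int)
    (Int.natCast_nonneg _) (Int.natCast_nonneg _)]
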